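-- pv_equiv track=rewrite | github.com/nwelter1/CT-DailyChallenge | 09_2022/9_19.py | setCommented
-- ===== SOURCE A (Python) =====
-- from typing import List
--
-- def setCommented(nums: List[int]) -> int:
--     # establish counter for answer
--     curr = 0
--     # create empty set to track what we have seen with O(1) Time
--     seen = set()
--     # loop over nums
--     for num in nums:
--         # if we have seen this number, this is a dupe
--         # subtract it from the counter
--         if num in seen:
--             curr -= num
--         # if not, we will add to the set and add the number to the counter
--         else:
--             curr += num
--             seen.add(num)
--     # we'll be left with all nums cancelled out aside from the non-dupe
--     return curr
-- ===== SOURCE B (Python) =====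
-- from typing import List
--
-- def setCommented(nums: List[int]) -> int:
--     # frequency map in one pass, then closed-form weight per distinct value:
--     # first occurrence contributes +v, each of the (c-1) later ones -v  =>  v*(2-c)
--     counts = {}
--     for n in nums:
--         counts[n] = counts.get(n, 0) + 1
--     return sum(v * (2 - c) for v, c in counts.items())
-- ===== Notes on version B (the rewrite author's own statement) =====
-- stated objective: alternative
-- what changed: Replaces the ordered seen-set pass with branching by a frequency-count pass followed by an arithmetic weight v*(2-c) summed over the distinct keys.
import Mathlib
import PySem

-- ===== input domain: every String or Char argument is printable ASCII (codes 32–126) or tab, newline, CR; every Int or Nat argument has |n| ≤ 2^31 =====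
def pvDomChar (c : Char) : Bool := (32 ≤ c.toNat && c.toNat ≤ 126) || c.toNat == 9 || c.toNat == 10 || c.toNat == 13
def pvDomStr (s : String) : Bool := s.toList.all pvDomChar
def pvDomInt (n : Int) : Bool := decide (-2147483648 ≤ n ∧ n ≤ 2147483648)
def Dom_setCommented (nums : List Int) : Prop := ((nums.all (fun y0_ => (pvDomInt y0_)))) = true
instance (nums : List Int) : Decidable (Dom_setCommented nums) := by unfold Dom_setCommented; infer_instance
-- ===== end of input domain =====

-- B changes the decomposition (frequency map + arithmetic weight v*(2-c) per distinct value) instead of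
-- A's ordered seen-set pass with branching; same cost, return value proved identical.

-- ===== PORT A =====
def setCommented (nums : List Int) : Int :=
  (nums.foldl
    (fun (st : Int × PySem.Set Int) num =>
      if PySem.Set.contains st.2 num then (st.1 - num, st.2)
      else (st.1 + num, PySem.Set.add st.2 num))
    (0, PySem.Set.empty)).1

-- ===== PORT B =====
def setCommented_alt (nums : List Int) : Int :=
  let counts : PySem.Dict Int Int :=
    nums.foldl (fun d n => d.insert n (d.getD n 0 + 1)) PySem.Dict.empty
  (counts.items.map (fun p => p.1 * (2 - p.2))).sum

-- ===== PRECONDITION & SPEC =====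
def Spec_setCommented (nums : List Int) (out : Int) : Prop := out = setCommented_alt nums
instance (nums : List Int) (out : Int) : Decidable (Spec_setCommented nums out) := by unfold Spec_setCommented; infer_instance

-- ===== CLAIM (what is proved, stated in full; the proofs are below) =====
def Claim_equal_setCommented : Prop := ∀ (nums : List Int), Dom_setCommented nums → Spec_setCommented nums (setCommented nums)

-- ===== LEMMAS AND PROOFS =====

-- sum of the elements of `nums` that are new relative to seen-set `s` (each distinct one once)
def pvND (nums : List Int) (s : PySem.Set Int) : Int :=
  match nums with
  | [] => 0
  | a :: t => if a ∈ s then pvND t s else a + pvND t (PySem.Set.add s a)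

-- A's loop computes  c + 2 * (sum of new distinct) - (sum of all)
theorem pvA_loop (nums : List Int) : ∀ (c : Int) (s : PySem.Set Int),
    (nums.foldl
      (fun (st : Int × PySem.Set Int) num =>
        if PySem.Set.contains st.2 num then (st.1 - num, st.2)
        else (st.1 + num, PySem.Set.add st.2 num))
      (c, s)).1 = c + 2 * pvND nums s - nums.sum := by
  induction nums with
  | nil => intro c s; simp [pvND]
  | cons a t ih =>
    intro c s
    simp only [List.foldl_cons]
    split_ifs with hc
    · rw [ih]
      have h : a ∈ s := by simpa using hc
      simp [pvND, h]; ring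
    · rw [ih]
      have h : a ∉ s := by simpa using hc
      simp [pvND, h]; ring

-- the new distinct sum is what Set.update appends
theorem pvND_update (nums : List Int) : ∀ (s : PySem.Set Int),
    (PySem.Set.update s nums).sum = s.sum + pvND nums s := by
  induction nums with
  | nil => intro s; simp [pvND, PySem.Set.update]
  | cons a t ih =>
    intro s
    by_cases h : a ∈ s
    · have hadd : PySem.Set.add s a = s := by simp [PySem.Set.add, h]
      simp only [pvND, h, if_pos, PySem.Set.update, List.foldl_cons, hadd]
      exact ih s
    · have hadd : PySem.Set.add s a = s ++ [a] := by simp [PySem.Set.add, h]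
      have := ih (PySem.Set.add s a)
      simp only [pvND, h, if_neg, PySem.Set.update, List.foldl_cons, not_false_iff] at *
      rw [this, hadd]
      simp; ring

-- summing (if a = k then a else 0) over a nodup list containing a gives a
theorem pv_if_sum (a : Int) (d : List Int) (hnd : d.Nodup) (ha : a ∈ d) :
    (d.map (fun k => if a = k then a else 0)).sum = a := by
  induction d with
  | nil => cases ha
  | cons b t ih =>
    rcases List.mem_cons.mp ha with h | h
    · subst h
      have hz : (t.map (fun k => if a = k then a else (0:Int))).sum = 0 := by
        apply List.sum_eq_zero
        intro x hx
        obtain ⟨k, hk, rfl⟩ := List.mem_map.mp hx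
        have : a ≠ k := by rintro rfl; exact (List.nodup_cons.mp hnd).1 hk
        simp [this]
      simp [hz]
    · have hne : a ≠ b := by rintro rfl; exact (List.nodup_cons.mp hnd).1 h
      simp [hne, ih (List.nodup_cons.mp hnd).2 h]

-- summing k * count(k) over a nodup superset of nums' elements gives nums.sum
theorem pv_count_sum (nums : List Int) : ∀ (d : List Int), d.Nodup → (∀ x ∈ nums, x ∈ d) →
    (d.map (fun k => k * (nums.count k : Int))).sum = nums.sum := by
  induction nums with
  | nil => intro d _ _; simp
  | cons a t ih =>
    intro d hnd hsub
    have hmem : a ∈ d := hsub a (by simp)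
    have hsplit : ∀ k : Int, k * ((a :: t).count k : Int)
        = k * (t.count k : Int) + (if a = k then a else 0) := by
      intro k
      by_cases h : a = k
      · subst h; simp; ring
      · have hb : (a == k) = false := by simp [h]
        simp [h]
    calc (d.map (fun k => k * ((a :: t).count k : Int))).sum
        = (d.map (fun k => k * (t.count k : Int) + (if a = k then a else 0))).sum := by
          simp only [hsplit]
      _ = (d.map (fun k => k * (t.count k : Int))).sum
            + (d.map (fun k => if a = k then a else 0)).sum := by
          induction d with
          | nil => simp
          | cons b u ihd => simp [List.map_cons, List.sum_cons]; ring
      _ = t.sum + a := by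
          rw [ih d hnd (fun x hx => hsub x (by simp [hx])), pv_if_sum a d hnd hmem]
      _ = (a :: t).sum := by simp; ring

theorem pv_weight_sum (l : List Int) (c : Int → Int) :
    (l.map (fun k => k * (2 - c k))).sum = 2 * l.sum - (l.map (fun k => k * c k)).sum := by
  induction l with
  | nil => simp
  | cons a t ih => simp [ih]; ring

-- ===== VERDICT (by name: the statement is the Claim_ definition above) =====
theorem setCommented_spec : Claim_equal_setCommented := by
  intro nums _
  unfold Spec_setCommented setCommented
  rw [pvA_loop nums 0 PySem.Set.empty]
  have hB : setCommented_alt nums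
      = ((PySem.Dict.counter nums).items.map (fun p => p.1 * (2 - p.2))).sum := rfl
  rw [hB, PySem.Dict.items_counter, List.map_map]
  have h1 : (PySem.Set.ofList nums).sum = pvND nums PySem.Set.empty := by
    have := pvND_update nums PySem.Set.empty
    simpa [PySem.Set.update_nil_left, PySem.Set.empty] using this
  have h2 := pv_count_sum nums (PySem.Set.ofList nums)
      (PySem.Set.nodup_ofList nums) (fun x hx => (PySem.Set.mem_ofList _ _).mpr hx)
  have h3 := pv_weight_sum (PySem.Set.ofList nums) (fun k => (nums.count k : Int))
  simp only [Function.comp_def] at *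
  rw [h3, h2, h1]
  ring
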